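-- pv_equiv track=rewrite | github.com/Apoorva2597/Preflight | src/longitudinal_state_builder.py | _entity_near_phrase
-- ===== SOURCE A (Python) =====
-- def _entity_near_phrase(entity_text: str, phrase: str, note_text: str,
--                         window: int = 80) -> bool:
--     """
--     Return True if entity_text appears within `window` characters
--     of `phrase` in note_text (case-insensitive).
--     """
--     text_lower = note_text.lower()
--     entity_lower = entity_text.lower()
--     phrase_lower = phrase.lower()
--
--     idx = 0
--     while True:
--         pos = text_lower.find(phrase_lower, idx)
--         if pos == -1:
--             break
--         start = max(0, pos - window)
--         end = min(len(text_lower), pos + len(phrase_lower) + window)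
--         context = text_lower[start:end]
--         if entity_lower in context or any(
--             word in context for word in entity_lower.split()
--             if len(word) > 4
--         ):
--             return True
--         idx = pos + 1
--     return False
-- ===== SOURCE B (Python) =====
-- def _entity_near_phrase(entity_text: str, phrase: str, note_text: str,
--                         window: int = 80) -> bool:
--     """Index-based re-implementation: collect phrase occurrence positions once,
--     then decide by position arithmetic whether some search term occurs inside
--     some phrase window."""
--     t = note_text.lower()
--     e = entity_text.lower()
--     p = phrase.lower()
--
--     positions = [i for i in range(len(t) - len(p) + 1) if t.startswith(p, i)]
--     if not positions:
--         return False
--     if not e: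
--         return True  # the empty entity is a substring of every context
--
--     terms = [e] + [w for w in e.split() if len(w) > 4]
--     for s in terms:
--         L = len(s)
--         for q in range(len(t) - L + 1):
--             if t.startswith(s, q):
--                 for pos in positions:
--                     if pos - window <= q and q + L <= pos + len(p) + window:
--                         return True
--     return False
-- ===== Notes on version B (the rewrite author's own statement) =====
-- stated objective: alternative
-- what changed: Replaces A's repeated find-then-slice-then-substring-scan loop by building the list of phrase occurrence positions once and deciding entity proximity with a purely numeric window test over term occurrence positions.
-- outside the precondition, e.g. on _entity_near_phrase('ac ', '', 'bacbac ba', -3): A returns True, B returns False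
import Mathlib
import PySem

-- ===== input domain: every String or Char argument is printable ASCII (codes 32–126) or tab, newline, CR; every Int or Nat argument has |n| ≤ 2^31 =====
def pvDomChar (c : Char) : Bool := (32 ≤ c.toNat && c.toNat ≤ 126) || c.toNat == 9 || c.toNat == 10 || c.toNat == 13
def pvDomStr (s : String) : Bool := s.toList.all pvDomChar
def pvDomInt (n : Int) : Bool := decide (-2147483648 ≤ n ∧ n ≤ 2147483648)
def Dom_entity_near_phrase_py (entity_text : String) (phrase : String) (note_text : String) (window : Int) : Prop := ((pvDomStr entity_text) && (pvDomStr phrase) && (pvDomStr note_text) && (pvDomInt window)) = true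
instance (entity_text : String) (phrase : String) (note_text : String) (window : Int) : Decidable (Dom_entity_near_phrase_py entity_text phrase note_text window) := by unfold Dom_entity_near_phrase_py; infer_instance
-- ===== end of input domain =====

-- B replaces A's find/slice/substring-scan loop by occurrence-position indices plus a numeric
-- window test (objective: alternative; equivalence is about the return value only).

-- ===== PORT A =====
-- context window slice of A's loop body: text_lower[max(0,pos-window) : min(len(text_lower), pos+len(phrase_lower)+window)]
def pvContext (t p : List Char) (w : Int) (pos : Int) : List Char :=
  PySem.List.slice t (some (max 0 (pos - w))) (some (min (t.length : Int) (pos + (p.length : Int) + w)))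

-- A's if-condition: entity_lower in context or any(word in context for word in entity_lower.split() if len(word) > 4)
def pvHit (t e p : List Char) (w : Int) (pos : Int) : Bool :=
  PySem.Chars.isIn e (pvContext t p w pos) ||
    (PySem.Chars.split₀ e).any (fun word =>
      decide (4 < word.length) && PySem.Chars.isIn word (pvContext t p w pos))

-- A's while loop; idx strictly increases each pass and find fails once idx > len(t),
-- so fuel t.length + 2 is never exhausted.
def pvALoop (t e p : List Char) (w : Int) : Nat → Int → Bool
  | 0, _ => false
  | fuel + 1, idx =>
    let pos := PySem.Chars.findFrom t p idx
    if pos = -1 then false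
    else if pvHit t e p w pos then true
    else pvALoop t e p w fuel (pos + 1)

def entity_near_phrase_py (entity_text : String) (phrase : String) (note_text : String) (window : Int) : Bool :=
  let t := PySem.Chars.lower note_text.toList
  let e := PySem.Chars.lower entity_text.toList
  let p := PySem.Chars.lower phrase.toList
  pvALoop t e p window (t.length + 2) 0

-- ===== PORT B =====
def entity_near_phrase_py_alt (entity_text : String) (phrase : String) (note_text : String) (window : Int) : Bool :=
  let t := PySem.Chars.lower note_text.toList
  let e := PySem.Chars.lower entity_text.toList
  let p := PySem.Chars.lower phrase.toList
  let positions := (List.range (t.length + 1 - p.length)).filter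
      (fun i => PySem.Chars.startswith (t.drop i) p)
  if positions.isEmpty then false
  else if e.isEmpty then true
  else
    (e :: (PySem.Chars.split₀ e).filter (fun word => 4 < word.length)).any fun s =>
      (List.range (t.length + 1 - s.length)).any fun q =>
        PySem.Chars.startswith (t.drop q) s &&
          positions.any fun pos =>
            decide ((pos : Int) - window ≤ (q : Int)) &&
            decide ((q : Int) + (s.length : Int) ≤ (pos : Int) + (p.length : Int) + window)

-- ===== PRECONDITION & SPEC =====
-- Pre_ restricts to 0 ≤ window, the natural domain of a proximity window; for negative windows
-- Python's slice end min(len, pos+len(phrase)+window) can become negative and then wraps to the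
-- tail of the string, an artefact of A's slicing that B does not reproduce.
def Pre_entity_near_phrase_py (entity_text : String) (phrase : String) (note_text : String) (window : Int) : Prop :=
  0 ≤ window

instance (entity_text : String) (phrase : String) (note_text : String) (window : Int) : Decidable (Pre_entity_near_phrase_py entity_text phrase note_text window) := by unfold Pre_entity_near_phrase_py; infer_instance

def pvWitness_entity_near_phrase_py : String × String × String × Int := ("pain", "pain", "chronic pain noted", 5)

def Spec_entity_near_phrase_py (entity_text : String) (phrase : String) (note_text : String) (window : Int) (out : Bool) : Prop := out = entity_near_phrase_py_alt entity_text phrase note_text window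
instance (entity_text : String) (phrase : String) (note_text : String) (window : Int) (out : Bool) : Decidable (Spec_entity_near_phrase_py entity_text phrase note_text window out) := by unfold Spec_entity_near_phrase_py; infer_instance

-- ===== CLAIM (what is proved, stated in full; the proofs are below) =====
def Claim_equal_entity_near_phrase_py : Prop := ∀ (entity_text : String) (phrase : String) (note_text : String) (window : Int), Dom_entity_near_phrase_py entity_text phrase note_text window → Pre_entity_near_phrase_py entity_text phrase note_text window → Spec_entity_near_phrase_py entity_text phrase note_text window (entity_near_phrase_py entity_text phrase note_text window)

-- ===== LEMMAS AND PROOFS =====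

-- occurrence of s in t at position q
def pvOcc (t s : List Char) (q : Nat) : Prop := s <+: t.drop q ∧ q + s.length ≤ t.length

-- findFrom with a start past the end of the string returns -1 (CPython quirk)
lemma pv_findFrom_past (t p : List Char) (k : Nat) (h : t.length < k) :
    PySem.Chars.findFrom t p (k : Int) = -1 := by
  simp only [PySem.Chars.findFrom]
  have h1 : ¬ ((k : Int) < 0) := by omega
  have h2 : ((t.length : Int)) < (k : Int) := by exact_mod_cast h
  simp [h1, h2]

-- substring containment in A's context window, as a numeric condition (needs 0 ≤ w)
lemma pv_isIn_ctx (t p s : List Char) (w : Int) (pos : Nat) (hs : s ≠ [])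
    (hw : 0 ≤ w) :
    PySem.Chars.isIn s (pvContext t p w (pos : Int)) = true ↔
      ∃ q : Nat, pvOcc t s q ∧ (pos : Int) - w ≤ (q : Int) ∧
        (q : Int) + (s.length : Int) ≤ (pos : Int) + (p.length : Int) + w := by
  have ha : (0 : Int) ≤ max 0 ((pos : Int) - w) := le_max_left _ _
  have hb : (0 : Int) ≤ min ((t.length : Int)) ((pos : Int) + (p.length : Int) + w) := by
    have h0 : (0 : Int) ≤ (pos : Int) + (p.length : Int) + w := by positivity
    omega
  have haI : (((max 0 ((pos : Int) - w)).toNat : Nat) : Int) = max 0 ((pos : Int) - w) :=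
    Int.toNat_of_nonneg ha
  have hbI : (((min ((t.length : Int)) ((pos : Int) + (p.length : Int) + w)).toNat : Nat) : Int) =
      min ((t.length : Int)) ((pos : Int) + (p.length : Int) + w) := Int.toNat_of_nonneg hb
  rw [pvContext, PySem.List.slice_toNat _ ha hb, ← PySem.Chars.exists_prefix_drop_iff_isIn]
  generalize hA : (max 0 ((pos : Int) - w)).toNat = a at haI
  generalize hB : (min ((t.length : Int)) ((pos : Int) + (p.length : Int) + w)).toNat = b at hbI
  constructor
  · rintro ⟨j, hj⟩
    have hsne : 0 < s.length := List.length_pos_of_ne_nil hs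
    rw [List.drop_take, List.drop_drop] at hj
    rw [List.prefix_take_iff] at hj
    obtain ⟨hpre, hlen⟩ := hj
    have hqn : a + j + s.length ≤ t.length := by
      have hl := hpre.length_le
      rw [List.length_drop] at hl
      omega
    refine ⟨a + j, ⟨hpre, hqn⟩, ?_, ?_⟩
    · push_cast
      omega
    · push_cast
      omega
  · rintro ⟨q, ⟨hpre, hqn⟩, h1, h2⟩
    have haq : a ≤ q := by omega
    have hqb : q + s.length ≤ b := by omega
    refine ⟨q - a, ?_⟩
    rw [List.drop_take, List.drop_drop, List.prefix_take_iff]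
    have hqa : a + (q - a) = q := by omega
    rw [hqa]
    exact ⟨hpre, by omega⟩

-- A's hit condition, as existence of a term occurrence satisfying B's numeric test
lemma pv_hit_iff (t e p : List Char) (w : Int) (pos : Nat) (he : e ≠ [])
    (hw : 0 ≤ w) :
    pvHit t e p w (pos : Int) = true ↔
      ∃ s, (s = e ∨ (s ∈ PySem.Chars.split₀ e ∧ 4 < s.length)) ∧
        ∃ q : Nat, pvOcc t s q ∧ (pos : Int) - w ≤ (q : Int) ∧
          (q : Int) + (s.length : Int) ≤ (pos : Int) + (p.length : Int) + w := by
  rw [pvHit]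
  simp only [Bool.or_eq_true, List.any_eq_true, Bool.and_eq_true, decide_eq_true_eq]
  constructor
  · rintro (h | ⟨word, hmem, hlen, h⟩)
    · exact ⟨e, Or.inl rfl, (pv_isIn_ctx t p e w pos he hw).mp h⟩
    · have hword : word ≠ [] := by intro hh; simp [hh] at hlen
      exact ⟨word, Or.inr ⟨hmem, hlen⟩, (pv_isIn_ctx t p word w pos hword hw).mp h⟩
  · rintro ⟨s, hs, hq⟩
    rcases hs with rfl | ⟨hmem, hlen⟩
    · exact Or.inl ((pv_isIn_ctx t p s w pos he hw).mpr hq)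
    · have hword : s ≠ [] := by intro hh; simp [hh] at hlen
      exact Or.inr ⟨s, hmem, hlen, (pv_isIn_ctx t p s w pos hword hw).mpr hq⟩

-- the while loop returns true iff some phrase occurrence at or after idx passes the hit test
lemma pv_loop_iff (t e p : List Char) (w : Int) (fuel k : Nat)
    (hk : k ≤ t.length + 1) (hfuel : t.length + 2 - k ≤ fuel) :
    pvALoop t e p w fuel (k : Int) = true ↔
      ∃ pos : Nat, k ≤ pos ∧ pos ≤ t.length ∧ p <+: t.drop pos ∧
        pvHit t e p w (pos : Int) = true := by
  induction fuel generalizing k with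
  | zero => omega
  | succ fuel ih =>
    rw [pvALoop]
    by_cases hkn : k ≤ t.length
    · by_cases hr : PySem.Chars.findFrom t p (k : Int) = -1
      · rw [if_pos hr]
        simp only [Bool.false_eq_true, false_iff]
        push Not
        intro pos h1 h2 h3
        exfalso
        have hinf : p <:+: t.drop k := by
          rw [← PySem.Chars.isIn_iff_infix, ← PySem.Chars.exists_prefix_drop_iff_isIn]
          exact ⟨pos - k, by rw [List.drop_drop]; rwa [show k + (pos - k) = pos by omega]⟩
        rw [PySem.Chars.findFrom_natCast_eq_neg_one_iff t p k hkn] at hr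
        exact hr hinf
      · obtain ⟨hge, hpre, hmin⟩ := PySem.Chars.findFrom_natCast_spec t p k hkn hr
        set r : Int := PySem.Chars.findFrom t p (k : Int) with hrdef
        have hr0 : 0 ≤ r := le_trans (by positivity) hge
        have hrn : r.toNat ≤ t.length := by
          rw [PySem.Chars.findFrom_natCast t p k hkn] at hrdef
          by_cases hf : PySem.Chars.find (t.drop k) p = -1
          · simp [hf] at hrdef; omega
          · rw [if_neg hf] at hrdef
            have hfl := PySem.Chars.find_le_length (t.drop k) p
            rw [List.length_drop] at hfl
            omega
        have hrcast : ((r.toNat : Nat) : Int) = r := Int.toNat_of_nonneg hr0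
        rw [if_neg hr]
        by_cases hhit : pvHit t e p w r = true
        · rw [if_pos hhit]
          constructor
          · intro _
            exact ⟨r.toNat, by omega, hrn, hpre, by rwa [hrcast]⟩
          · intro _; rfl
        · rw [if_neg hhit]
          have hstep : r + 1 = (((r.toNat + 1 : Nat)) : Int) := by push_cast; omega
          rw [hstep, ih (r.toNat + 1) (by omega) (by omega)]
          constructor
          · rintro ⟨pos, h1, h2, h3, h4⟩
            exact ⟨pos, by omega, h2, h3, h4⟩
          · rintro ⟨pos, h1, h2, h3, h4⟩
            refine ⟨pos, ?_, h2, h3, h4⟩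
            by_cases hlt : pos < r.toNat
            · exact absurd h3 (hmin pos h1 hlt)
            · have hne : pos ≠ r.toNat := by
                intro hh; rw [hh, hrcast] at h4; exact hhit h4
              omega
    · rw [pv_findFrom_past t p k (by omega), if_pos rfl]
      simp only [Bool.false_eq_true, false_iff]
      push Not
      intro pos h1 h2
      omega

-- ===== VERDICT (by name: the statement is the Claim_ definition above) =====
theorem entity_near_phrase_py_spec : Claim_equal_entity_near_phrase_py := by
  intro entity_text phrase note_text window _hdom hpre
  unfold Spec_entity_near_phrase_py
  unfold entity_near_phrase_py entity_near_phrase_py_alt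
  set t := PySem.Chars.lower note_text.toList with ht
  set e := PySem.Chars.lower entity_text.toList with he
  set p := PySem.Chars.lower phrase.toList with hp
  have hw : (0 : Int) ≤ window := hpre
  have hA := pv_loop_iff t e p window (t.length + 2) 0 (by omega) (by omega)
  rw [Nat.cast_zero] at hA
  have hposmem : ∀ pos : Nat,
      pos ∈ (List.range (t.length + 1 - p.length)).filter
        (fun i => PySem.Chars.startswith (t.drop i) p) ↔ pvOcc t p pos := by
    intro pos
    simp only [List.mem_filter, List.mem_range, PySem.Chars.startswith_iff, pvOcc]
    constructor
    · rintro ⟨h1, h2⟩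
      refine ⟨h2, ?_⟩
      have hl := h2.length_le
      rw [List.length_drop] at hl
      omega
    · rintro ⟨h1, h2⟩
      exact ⟨by omega, h1⟩
  by_cases hempty :
      ((List.range (t.length + 1 - p.length)).filter
        (fun i => PySem.Chars.startswith (t.drop i) p)).isEmpty = true
  · -- no phrase occurrence: both sides false
    rw [if_pos hempty, Bool.eq_false_iff]
    intro h
    rw [hA] at h
    obtain ⟨pos, -, h2, h3, -⟩ := h
    have hocc : pvOcc t p pos := ⟨h3, by
      have hl := h3.length_le
      rw [List.length_drop] at hl
      omega⟩
    have hmem := (hposmem pos).mpr hocc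
    rw [List.isEmpty_iff.mp hempty] at hmem
    exact absurd hmem (List.not_mem_nil)
  · rw [if_neg hempty]
    have hex : ∃ pos : Nat, pvOcc t p pos := by
      obtain ⟨pos, hlt, hsw⟩ :=
        (by simpa using hempty :
          ∃ x, x < t.length + 1 - p.length ∧ PySem.Chars.startswith (t.drop x) p = true)
      exact ⟨pos, (hposmem pos).mp (List.mem_filter.mpr ⟨List.mem_range.mpr hlt, hsw⟩)⟩
    by_cases heq : e.isEmpty = true
    · -- empty entity: '' is in every context, so A is true iff a phrase occurrence exists
      rw [if_pos heq, hA]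
      obtain ⟨pos, hocc⟩ := hex
      have hposn : pos ≤ t.length := by
        rcases hocc with ⟨-, h2⟩; omega
      refine ⟨pos, by omega, hposn, hocc.1, ?_⟩
      have he0 : e = [] := List.isEmpty_iff.mp heq
      rw [pvHit, he0, PySem.Chars.isIn_nil, Bool.true_or]
    · rw [if_neg heq]
      have hene : e ≠ [] := by intro hh; exact heq (by rw [hh]; rfl)
      rw [Bool.eq_iff_iff, hA]
      constructor
      · rintro ⟨pos, -, hposn, h3, h4⟩
        have hocc : pvOcc t p pos := ⟨h3, by
          have hl := h3.length_le
          rw [List.length_drop] at hl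
          omega⟩
        obtain ⟨s, hs, q, ⟨hqpre, hqlen⟩, hq1, hq2⟩ :=
          (pv_hit_iff t e p window pos hene hw).mp h4
        rw [List.any_eq_true]
        refine ⟨s, ?_, ?_⟩
        · rcases hs with rfl | ⟨hm, hl⟩
          · simp
          · exact List.mem_cons_of_mem _ (List.mem_filter.mpr ⟨hm, by simp [hl]⟩)
        · rw [List.any_eq_true]
          refine ⟨q, List.mem_range.mpr (by omega), ?_⟩
          rw [Bool.and_eq_true]
          refine ⟨(PySem.Chars.startswith_iff _ _).mpr hqpre, ?_⟩
          rw [List.any_eq_true]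
          refine ⟨pos, (hposmem pos).mpr hocc, ?_⟩
          rw [Bool.and_eq_true, decide_eq_true_eq, decide_eq_true_eq]
          exact ⟨hq1, hq2⟩
      · intro hB
        rw [List.any_eq_true] at hB
        obtain ⟨s, hsmem, hB2⟩ := hB
        rw [List.any_eq_true] at hB2
        obtain ⟨q, hqr, hB3⟩ := hB2
        rw [Bool.and_eq_true] at hB3
        obtain ⟨hqsw, hB4⟩ := hB3
        rw [List.any_eq_true] at hB4
        obtain ⟨pos, hposmem2, hB5⟩ := hB4
        rw [Bool.and_eq_true, decide_eq_true_eq, decide_eq_true_eq] at hB5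
        have hocc : pvOcc t p pos := (hposmem pos).mp hposmem2
        have hposn : pos ≤ t.length := by rcases hocc with ⟨-, hh⟩; omega
        have hqpre : s <+: t.drop q := (PySem.Chars.startswith_iff _ _).mp hqsw
        have hqr' : q < t.length + 1 - s.length := List.mem_range.mp hqr
        refine ⟨pos, by omega, hposn, hocc.1, ?_⟩
        refine (pv_hit_iff t e p window pos hene hw).mpr
          ⟨s, ?_, q, ⟨hqpre, by omega⟩, hB5.1, hB5.2⟩
        rcases List.mem_cons.mp hsmem with rfl | hm
        · exact Or.inl rfl
        · rcases List.mem_filter.mp hm with ⟨hm1, hm2⟩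
          exact Or.inr ⟨hm1, by simpa using hm2⟩
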